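-- pv_equiv track=rewrite | github.com/isayaksh/Algorithm | BaekJoon/18353.py | solution
-- ===== SOURCE A (Python) =====
-- from bisect import bisect_left
--
-- def solution(N, soldiers):
--     answer = [0]
--     for i in range(N-1, -1, -1):
--         soldier = soldiers[i]
--         idx = bisect_left(answer, soldier)
--         try:
--             answer[idx] = soldier
--         except:
--             answer.append(soldier)
--
--     return N - (len(answer) - 1)
-- ===== SOURCE B (Python) =====
-- def solution(N, soldiers):
--     # O(N^2) longest-strictly-increasing-subsequence DP over the reversed prefix,
--     # seeded with the sentinel 0 (matching A's initial answer=[0]).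
--     seq = [0]
--     for i in range(N-1, -1, -1):
--         seq.append(soldiers[i])
--     dp = []
--     pre = []
--     for x in seq:
--         best = 0
--         for v, d in zip(pre, dp):
--             if v < x and d > best:
--                 best = d
--         dp.append(best + 1)
--         pre.append(x)
--     return N - (max(dp) - 1)
-- ===== Notes on version B (the rewrite author's own statement) =====
-- stated objective: alternative
-- what changed: Replaces A's patience-sorting (bisect_left tail list updated in place) by the classic quadratic longest-strictly-increasing-subsequence DP over the sentinel-seeded reversed prefix.
import Mathlib
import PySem

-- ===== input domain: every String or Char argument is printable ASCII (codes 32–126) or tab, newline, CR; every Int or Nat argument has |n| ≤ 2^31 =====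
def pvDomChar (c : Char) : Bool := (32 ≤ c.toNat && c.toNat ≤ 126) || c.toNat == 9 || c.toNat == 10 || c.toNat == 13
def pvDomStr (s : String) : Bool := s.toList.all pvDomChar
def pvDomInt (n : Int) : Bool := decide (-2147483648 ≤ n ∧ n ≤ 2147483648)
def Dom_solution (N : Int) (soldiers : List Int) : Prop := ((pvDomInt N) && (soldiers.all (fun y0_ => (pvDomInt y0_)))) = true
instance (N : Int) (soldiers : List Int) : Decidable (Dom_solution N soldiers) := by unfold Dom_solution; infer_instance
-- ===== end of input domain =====

-- B replaces A's patience-sorting (bisect_left on a tail list) by the classic quadratic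
-- strictly-increasing-subsequence DP; same return value, no speed claim.

-- ===== PORT A =====
-- bisect.bisect_left ported as the insertion point before the first element ≥ x;
-- exact for sorted lists, and `answer` is invariantly sorted here.
def pyBisectLeft (a : List Int) (x : Int) : Nat := (a.takeWhile (fun v => v < x)).length

def solution (N : Int) (soldiers : List Int) : Int :=
  let answer := (PySem.List.pyRange (N - 1) (-1) (-1)).foldl (fun ans i =>
    match PySem.List.pyGet? soldiers i with
    | none => ans  -- soldiers[i] raises IndexError; excluded by Pre_solution
    | some soldier =>
      let idx := pyBisectLeft ans soldier
      -- try: answer[idx] = soldier; except: answer.append(soldier)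
      if idx < ans.length then ans.set idx soldier else ans ++ [soldier]) [0]
  N - ((answer.length : Int) - 1)

-- ===== PORT B =====
def solution_alt (N : Int) (soldiers : List Int) : Int :=
  let seq := (PySem.List.pyRange (N - 1) (-1) (-1)).foldl (fun s i =>
    match PySem.List.pyGet? soldiers i with
    | none => s  -- soldiers[i] raises IndexError; excluded by Pre_solution
    | some v => s ++ [v]) [0]
  let st := seq.foldl (fun (st : List Int × List Int) x =>
    let best := (st.1.zip st.2).foldl (fun b p => if p.1 < x ∧ b < p.2 then p.2 else b) 0
    (st.1 ++ [x], st.2 ++ [best + 1])) ([], [])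
  match PySem.List.max? st.2 (fun y => y) with
  | some m => N - (m - 1)
  | none => 0  -- max([]) raises ValueError; unreachable: dp is never empty (seq starts with the sentinel)

-- ===== PRECONDITION & SPEC =====
-- Pre_ excludes exactly the inputs where A raises IndexError on soldiers[i] (N > len(soldiers)).
def Pre_solution (N : Int) (soldiers : List Int) : Prop := N ≤ (soldiers.length : Int)
instance (N : Int) (soldiers : List Int) : Decidable (Pre_solution N soldiers) := by unfold Pre_solution; infer_instance
def pvWitness_solution : Int × List Int := (3, [4, 1, 3])

def Spec_solution (N : Int) (soldiers : List Int) (out : Int) : Prop := out = solution_alt N soldiers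
instance (N : Int) (soldiers : List Int) (out : Int) : Decidable (Spec_solution N soldiers out) := by unfold Spec_solution; infer_instance

-- ===== CLAIM (what is proved, stated in full; the proofs are below) =====
def Claim_equal_solution : Prop := ∀ (N : Int) (soldiers : List Int), Dom_solution N soldiers → Pre_solution N soldiers → Spec_solution N soldiers (solution N soldiers)

-- ===== LEMMAS AND PROOFS =====

-- Structural form of one patience step: replace the first element ≥ x, else append.
def patStep (a : List Int) (x : Int) : List Int :=
  match a with
  | [] => [x]
  | h :: t => if h < x then h :: patStep t x else x :: t

def pat (l : List Int) : List Int := l.foldl patStep []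

def cnt (a : List Int) (x : Int) : Nat := a.countP (fun v => decide (v < x))

-- B's DP state builder (exactly the fold in solution_alt).
def dplF (l : List Int) : List Int × List Int :=
  l.foldl (fun (st : List Int × List Int) x =>
    let best := (st.1.zip st.2).foldl (fun b p => if p.1 < x ∧ b < p.2 then p.2 else b) 0
    (st.1 ++ [x], st.2 ++ [best + 1])) ([], [])

lemma stepA_eq (a : List Int) (x : Int) :
    (if pyBisectLeft a x < a.length then a.set (pyBisectLeft a x) x else a ++ [x]) = patStep a x := by
  induction a with
  | nil => simp [patStep, pyBisectLeft]
  | cons h t ih =>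
    by_cases hx : h < x
    · rw [show patStep (h :: t) x = h :: patStep t x by simp [patStep, hx]]
      rw [← ih]
      have hbl : pyBisectLeft (h :: t) x = pyBisectLeft t x + 1 := by
        simp [pyBisectLeft, hx]
      rw [hbl]
      by_cases hc : pyBisectLeft t x < t.length
      · simp [hc]
      · simp [hc]
    · simp [pyBisectLeft, patStep, hx]

lemma mem_patStep {a : List Int} {x z : Int} (hz : z ∈ patStep a x) : z ∈ a ∨ z = x := by
  induction a with
  | nil => simpa [patStep] using hz
  | cons h t ih =>
    by_cases hx : h < x
    · simp only [patStep, hx, if_pos, List.mem_cons] at hz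
      rcases hz with rfl | hz
      · exact Or.inl (List.mem_cons_self)
      · rcases ih hz with h1 | h1
        · exact Or.inl (List.mem_cons_of_mem _ h1)
        · exact Or.inr h1
    · simp only [patStep, hx, if_neg, not_false_iff, List.mem_cons] at hz
      rcases hz with rfl | hz
      · exact Or.inr rfl
      · exact Or.inl (List.mem_cons_of_mem _ hz)

lemma pairwise_patStep {a : List Int} (x : Int) (hp : a.Pairwise (· < ·)) :
    (patStep a x).Pairwise (· < ·) := by
  induction a with
  | nil => simp [patStep]
  | cons h t ih =>
    rcases List.pairwise_cons.mp hp with ⟨hall, ht⟩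
    by_cases hx : h < x
    · simp only [patStep, hx, if_pos]
      refine List.pairwise_cons.mpr ⟨?_, ih ht⟩
      intro z hz
      rcases mem_patStep hz with h1 | rfl
      · exact hall z h1
      · exact hx
    · simp only [patStep, hx, if_neg, not_false_iff]
      refine List.pairwise_cons.mpr ⟨?_, ht⟩
      intro z hz
      exact lt_of_le_of_lt (not_lt.mp hx) (hall z hz)

lemma cnt_eq_zero {t : List Int} {x : Int} (h : ∀ z ∈ t, x ≤ z) : cnt t x = 0 := by
  unfold cnt
  rw [List.countP_eq_zero]
  intro z hz
  simpa using not_lt.mpr (h z hz)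

lemma cnt_cons (z : Int) (t : List Int) (x : Int) :
    cnt (z :: t) x = cnt t x + if z < x then 1 else 0 := by
  by_cases h : z < x <;> simp [cnt, h]

lemma cnt_patStep {a : List Int} (hp : a.Pairwise (· < ·)) (y x : Int) :
    cnt (patStep a y) x = if y < x then max (cnt a x) (cnt a y + 1) else cnt a x := by
  induction a with
  | nil => by_cases h : y < x <;> simp [patStep, cnt, h]
  | cons h t ih =>
    rcases List.pairwise_cons.mp hp with ⟨hall, ht⟩
    by_cases hy : h < y
    · have iht := ih ht
      rw [show patStep (h :: t) y = h :: patStep t y by simp [patStep, hy]]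
      rw [cnt_cons, cnt_cons, cnt_cons, iht]
      by_cases hx : y < x
      · have hhx : h < x := lt_trans hy hx
        simp only [hx, hy, hhx, if_pos]
        omega
      · simp [hx]
    · rw [show patStep (h :: t) y = y :: t by simp [patStep, hy]]
      have hty : cnt t y = 0 :=
        cnt_eq_zero (fun z hz => le_of_lt (lt_of_le_of_lt (not_lt.mp hy) (hall z hz)))
      rw [cnt_cons, cnt_cons, cnt_cons, hty]
      by_cases hx : y < x
      · by_cases hhx : h < x
        · simp only [hx, hhx, hy, if_pos, if_neg, not_false_iff]
          omega
        · have htx : cnt t x = 0 :=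
            cnt_eq_zero (fun z hz => le_of_lt (lt_of_le_of_lt (not_lt.mp hhx) (hall z hz)))
          simp [hx, hhx, hy, htx]
      · have hhy : ¬ h < x := fun hc => hy (lt_of_lt_of_le hc (not_lt.mp hx))
        simp [hx, hhy]

lemma length_patStep {a : List Int} (hp : a.Pairwise (· < ·)) (y : Int) :
    (patStep a y).length = max a.length (cnt a y + 1) := by
  induction a with
  | nil => simp [patStep, cnt]
  | cons h t ih =>
    rcases List.pairwise_cons.mp hp with ⟨hall, ht⟩
    by_cases hy : h < y
    · have iht := ih ht
      rw [show patStep (h :: t) y = h :: patStep t y by simp [patStep, hy]]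
      rw [List.length_cons, iht, cnt_cons, List.length_cons]
      simp only [hy, if_pos]
      omega
    · rw [show patStep (h :: t) y = y :: t by simp [patStep, hy]]
      have hty : cnt t y = 0 :=
        cnt_eq_zero (fun z hz => le_of_lt (lt_of_le_of_lt (not_lt.mp hy) (hall z hz)))
      rw [List.length_cons, cnt_cons, hty, List.length_cons]
      simp only [hy, if_neg, not_false_iff]
      omega

-- max(l ++ [e]) in terms of max(l)
lemma maxid_append (l : List Int) (e : Int) :
    PySem.List.max? (l ++ [e]) (fun y => y) =
      some (match PySem.List.max? l (fun y => y) with | none => e | some m => max m e) := by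
  cases l with
  | nil =>
    rw [List.nil_append, show (PySem.List.max? ([] : List Int) (fun y => y)) = none from
      (PySem.List.max?_eq_none_iff _ _).mpr rfl]
    simp [PySem.List.max?_id_cons]
  | cons h t =>
    rw [List.cons_append, PySem.List.max?_id_cons, PySem.List.max?_id_cons]
    simp [List.foldl_append]

lemma dplF_append (q : List Int) (y : Int) :
    dplF (q ++ [y]) = ((dplF q).1 ++ [y], (dplF q).2 ++
      [((dplF q).1.zip (dplF q).2).foldl (fun b p => if p.1 < y ∧ b < p.2 then p.2 else b) 0 + 1]) := by
  unfold dplF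
  rw [List.foldl_append]
  rfl

-- The joint invariant of patience sorting and the DP, by reverse induction.
lemma main_inv (q : List Int) :
    (pat q).Pairwise (· < ·) ∧
    (dplF q).1 = q ∧
    (dplF q).2.length = q.length ∧
    (∀ x : Int, (q.zip (dplF q).2).foldl (fun b p => if p.1 < x ∧ b < p.2 then p.2 else b) 0
        = (cnt (pat q) x : Int)) ∧
    (PySem.List.max? (dplF q).2 (fun y => y)
        = if q = [] then none else some (((pat q).length : Nat) : Int)) := by
  induction q using List.reverseRecOn with
  | nil => simp [pat, dplF, cnt]
  | append_singleton q y IH =>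
    obtain ⟨hsort, hfst, hlen, hbest, hmax⟩ := IH
    have hpat : pat (q ++ [y]) = patStep (pat q) y := by
      simp [pat, List.foldl_append]
    have hdpl : dplF (q ++ [y]) =
        (q ++ [y], (dplF q).2 ++ [(cnt (pat q) y : Int) + 1]) := by
      have h0 := dplF_append q y
      rw [hfst, hbest y] at h0
      exact h0
    refine ⟨?_, ?_, ?_, ?_, ?_⟩
    · rw [hpat]; exact pairwise_patStep y hsort
    · rw [hdpl]
    · rw [hdpl]; simp [hlen]
    · intro x
      rw [hdpl, hpat]
      have hzip : (q ++ [y]).zip ((dplF q).2 ++ [(cnt (pat q) y : Int) + 1])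
          = q.zip (dplF q).2 ++ [(y, (cnt (pat q) y : Int) + 1)] := by
        rw [List.zip_append (by omega)]
        simp
      rw [hzip, List.foldl_append, hbest x, List.foldl_cons, List.foldl_nil]
      rw [cnt_patStep hsort y x]
      by_cases hx : y < x
      · simp only [hx, if_pos, true_and]
        by_cases hc : (cnt (pat q) x : Int) < (cnt (pat q) y : Int) + 1
        · simp [hc]; omega
        · simp [hc]; omega
      · simp [hx]
    · rw [hdpl, hpat]
      rw [maxid_append]
      rw [if_neg (by simp : ¬ q ++ [y] = [])]
      by_cases hq : q = []
      · subst hq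
        rw [show ((dplF ([] : List Int)).2) = [] from rfl]
        rw [show (PySem.List.max? ([] : List Int) (fun y => y)) = none from
          (PySem.List.max?_eq_none_iff _ _).mpr rfl]
        simp [pat, patStep, cnt]
      · rw [if_neg hq] at hmax
        rw [hmax]
        rw [length_patStep hsort y]
        congr 1
        push_cast [Nat.cast_max]
        ring

-- Bridge: under Pre_, A's fold is patience over the fetched values, B's seq collects them.
lemma foldA_bridge (soldiers : List Int) (L : List Int)
    (h : ∀ i ∈ L, (PySem.List.pyGet? soldiers i).isSome) (a0 : List Int) :
    L.foldl (fun ans i =>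
      match PySem.List.pyGet? soldiers i with
      | none => ans
      | some soldier =>
        let idx := pyBisectLeft ans soldier
        if idx < ans.length then ans.set idx soldier else ans ++ [soldier]) a0
    = (L.map (fun i => (PySem.List.pyGet? soldiers i).getD 0)).foldl patStep a0 := by
  induction L generalizing a0 with
  | nil => rfl
  | cons i t ih =>
    obtain ⟨v, hv⟩ := Option.isSome_iff_exists.mp (h i List.mem_cons_self)
    simp only [List.foldl_cons, List.map_cons, hv, Option.getD_some]
    rw [stepA_eq a0 v]
    exact ih (fun j hj => h j (List.mem_cons_of_mem _ hj)) _

lemma foldB_bridge (soldiers : List Int) (L : List Int)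
    (h : ∀ i ∈ L, (PySem.List.pyGet? soldiers i).isSome) (a0 : List Int) :
    L.foldl (fun s i =>
      match PySem.List.pyGet? soldiers i with
      | none => s
      | some v => s ++ [v]) a0
    = a0 ++ L.map (fun i => (PySem.List.pyGet? soldiers i).getD 0) := by
  induction L generalizing a0 with
  | nil => simp
  | cons i t ih =>
    obtain ⟨v, hv⟩ := Option.isSome_iff_exists.mp (h i List.mem_cons_self)
    simp only [List.foldl_cons, List.map_cons, hv, Option.getD_some]
    rw [ih (fun j hj => h j (List.mem_cons_of_mem _ hj))]
    simp

lemma solutionA_eq (N : Int) (soldiers : List Int)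
    (hmem : ∀ i ∈ PySem.List.pyRange (N - 1) (-1) (-1), (PySem.List.pyGet? soldiers i).isSome) :
    solution N soldiers =
      N - (((pat (0 :: (PySem.List.pyRange (N - 1) (-1) (-1)).map
        (fun i => (PySem.List.pyGet? soldiers i).getD 0))).length : Int) - 1) := by
  show N - ((((PySem.List.pyRange (N - 1) (-1) (-1)).foldl (fun ans i =>
      match PySem.List.pyGet? soldiers i with
      | none => ans
      | some soldier =>
        let idx := pyBisectLeft ans soldier
        if idx < ans.length then ans.set idx soldier else ans ++ [soldier]) [0]).length : Int) - 1) = _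
  rw [foldA_bridge soldiers _ hmem [0]]
  rfl

lemma solutionB_eq (N : Int) (soldiers : List Int)
    (hmem : ∀ i ∈ PySem.List.pyRange (N - 1) (-1) (-1), (PySem.List.pyGet? soldiers i).isSome) :
    solution_alt N soldiers =
      N - (((pat (0 :: (PySem.List.pyRange (N - 1) (-1) (-1)).map
        (fun i => (PySem.List.pyGet? soldiers i).getD 0))).length : Int) - 1) := by
  show (match PySem.List.max? (((PySem.List.pyRange (N - 1) (-1) (-1)).foldl (fun s i =>
      match PySem.List.pyGet? soldiers i with
      | none => s
      | some v => s ++ [v]) [0]).foldl (fun (st : List Int × List Int) x =>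
        let best := (st.1.zip st.2).foldl (fun b p => if p.1 < x ∧ b < p.2 then p.2 else b) 0
        (st.1 ++ [x], st.2 ++ [best + 1])) ([], [])).2 (fun y => y) with
    | some m => N - (m - 1)
    | none => 0) = _
  rw [foldB_bridge soldiers _ hmem [0]]
  obtain ⟨_, _, _, _, hmax⟩ := main_inv
    (0 :: (PySem.List.pyRange (N - 1) (-1) (-1)).map (fun i => (PySem.List.pyGet? soldiers i).getD 0))
  rw [if_neg (by simp)] at hmax
  show (match PySem.List.max? (dplF
      (0 :: (PySem.List.pyRange (N - 1) (-1) (-1)).map (fun i => (PySem.List.pyGet? soldiers i).getD 0))).2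
      (fun y => y) with
    | some m => N - (m - 1)
    | none => 0) = _
  rw [hmax]

-- ===== VERDICT (by name: the statement is the Claim_ definition above) =====
theorem solution_spec : Claim_equal_solution := by
  intro N soldiers _hdom hpre
  have hmem : ∀ i ∈ PySem.List.pyRange (N - 1) (-1) (-1),
      (PySem.List.pyGet? soldiers i).isSome := by
    intro i hi
    rw [PySem.List.mem_pyRange_neg_one] at hi
    have h0 : 0 ≤ i := by omega
    have hp : N ≤ (soldiers.length : Int) := hpre
    have h1 : i < (soldiers.length : Int) := by omega
    rw [PySem.List.pyGet?_eq_some_getElem soldiers h0 h1]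
    simp
  unfold Spec_solution
  rw [solutionA_eq N soldiers hmem, solutionB_eq N soldiers hmem]
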